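-- pv_equiv track=rewrite | github.com/rajatnarang94/File-Transfer-Protocols | simple-FTP-GoBackN/server.py | compute_checksum_for_chuck
-- ===== SOURCE A (Python) =====
-- def compute_checksum_for_chuck(chunk,checksum):
--     for byte in range(0, len(chunk), 2):
--         byte1 = ord(chunk[byte])
--         if byte+1 < len(chunk):
--             byte2 = ord(chunk[byte+1])
--         else:
--             byte2 = 0xffff
--         merged_bytes = (byte1<<8) + byte2
--         checksum_add = checksum + merged_bytes
--         checksum = (checksum_add&0xffff) + (checksum_add>>16)
--
--     return (checksum^0xffff)
-- ===== SOURCE B (Python) =====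
-- def compute_checksum_for_chuck(chunk, checksum):
--     # Pass 1: pair up the bytes into 16-bit words with a pending-byte state
--     # machine (the lone trailing byte is completed with 0xffff).
--     words = []
--     pending = None
--     for c in chunk:
--         if pending is None:
--             pending = ord(c)
--         else:
--             words.append((pending << 8) + ord(c))
--             pending = None
--     if pending is not None:
--         words.append((pending << 8) + 0xffff)
--     # Pass 2: one's-complement-style folding add of the words.
--     for word in words:
--         s = checksum + word
--         checksum = (s & 0xffff) + (s >> 16)
--     return checksum ^ 0xffff
-- ===== Notes on version B (the rewrite author's own statement) =====
-- stated objective: alternative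
-- what changed: B replaces A's index-stride loop (range(0,len,2) with in-loop bounds-checked indexing and an in-loop odd-tail branch) by a two-pass decomposition: a per-character state machine that first builds the list of 16-bit words (padding the odd tail outside any index arithmetic), then a separate folding-add pass over that word list.
import Mathlib
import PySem

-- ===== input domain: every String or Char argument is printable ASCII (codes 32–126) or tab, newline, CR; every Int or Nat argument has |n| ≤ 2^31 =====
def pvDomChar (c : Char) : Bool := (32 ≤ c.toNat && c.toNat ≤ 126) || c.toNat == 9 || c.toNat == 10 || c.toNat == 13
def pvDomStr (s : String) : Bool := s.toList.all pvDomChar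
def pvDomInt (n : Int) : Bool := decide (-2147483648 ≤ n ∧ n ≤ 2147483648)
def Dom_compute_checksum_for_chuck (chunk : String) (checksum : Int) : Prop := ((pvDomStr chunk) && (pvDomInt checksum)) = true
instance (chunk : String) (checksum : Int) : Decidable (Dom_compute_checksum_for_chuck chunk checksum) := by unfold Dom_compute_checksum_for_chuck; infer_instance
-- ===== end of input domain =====

-- B replaces A's index-stride loop by a two-pass decomposition (build the 16-bit word
-- list with a pending-byte state machine, then fold-add the words); alternative, not faster.

-- ===== PORT A =====
-- loop body of A: byte1/byte2 via indexing, merge, add, fold once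
def pvStepA (cs : List Char) (checksum byte : Int) : Int :=
  let byte1 : Int := ((PySem.List.pyGetD cs byte 'A').toNat : Int)   -- chunk[byte], always in range here
  let byte2 : Int := if byte + 1 < (cs.length : Int) then ((PySem.List.pyGetD cs (byte + 1) 'A').toNat : Int) else 0xffff
  let merged_bytes : Int := (byte1 <<< (8 : Nat)) + byte2
  let checksum_add : Int := checksum + merged_bytes
  PySem.Int.band checksum_add 0xffff + (checksum_add >>> (16 : Nat))

def compute_checksum_for_chuck (chunk : String) (checksum : Int) : Int :=
  let cs := chunk.toList
  PySem.Int.bxor ((PySem.List.pyRange 0 (cs.length : Int) 2).foldl (pvStepA cs) checksum) 0xffff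

-- ===== PORT B =====
-- pass 1 step: pair up bytes with a pending-byte state
def pvPairStep (st : List Int × Option Int) (c : Char) : List Int × Option Int :=
  match st.2 with
  | none => (st.1, some ((c.toNat : Int)))
  | some p => (st.1 ++ [(p <<< (8 : Nat)) + (c.toNat : Int)], none)

-- after pass 1: complete a lone trailing byte with 0xffff
def pvFinishWords (st : List Int × Option Int) : List Int :=
  match st.2 with
  | none => st.1
  | some p => st.1 ++ [(p <<< (8 : Nat)) + 0xffff]

-- pass 2 step: folding add
def pvFoldAdd (checksum word : Int) : Int :=
  let s := checksum + word
  PySem.Int.band s 0xffff + (s >>> (16 : Nat))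

def compute_checksum_for_chuck_alt (chunk : String) (checksum : Int) : Int :=
  let words := pvFinishWords (chunk.toList.foldl pvPairStep ([], none))
  PySem.Int.bxor (words.foldl pvFoldAdd checksum) 0xffff

-- ===== PRECONDITION & SPEC =====
def Spec_compute_checksum_for_chuck (chunk : String) (checksum : Int) (out : Int) : Prop := out = compute_checksum_for_chuck_alt chunk checksum
instance (chunk : String) (checksum : Int) (out : Int) : Decidable (Spec_compute_checksum_for_chuck chunk checksum out) := by unfold Spec_compute_checksum_for_chuck; infer_instance

-- ===== CLAIM (what is proved, stated in full; the proofs are below) =====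
def Claim_equal_compute_checksum_for_chuck : Prop := ∀ (chunk : String) (checksum : Int), Dom_compute_checksum_for_chuck chunk checksum → Spec_compute_checksum_for_chuck chunk checksum (compute_checksum_for_chuck chunk checksum)

-- ===== LEMMAS AND PROOFS =====

-- the word list both programs effectively fold over
def pvWordsAux : Option Int → List Char → List Int
  | none, [] => []
  | some p, [] => [(p <<< (8 : Nat)) + 0xffff]
  | none, c :: rest => pvWordsAux (some ((c.toNat : Int))) rest
  | some p, c :: rest => ((p <<< (8 : Nat)) + (c.toNat : Int)) :: pvWordsAux none rest

theorem pvGetD_shift (x y : Char) (xs : List Char) (i : Int) (hi : 0 ≤ i) (d : Char) :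
    PySem.List.pyGetD (x :: y :: xs) (i + 2) d = PySem.List.pyGetD xs i d := by
  rw [PySem.List.pyGetD_of_nonneg _ _ (by omega), PySem.List.pyGetD_of_nonneg _ _ hi]
  have h : (i + 2).toNat = i.toNat + 2 := by omega
  rw [h]
  rfl

theorem pvStepA_shift (a b : Char) (rest : List Char) (s x : Int) (hx : 0 ≤ x) :
    pvStepA (a :: b :: rest) s (x + 2) = pvStepA rest s x := by
  have hlen : (((a :: b :: rest) : List Char).length : Int) = (rest.length : Int) + 2 := by
    push_cast [List.length_cons]; ring
  have h2 : x + 2 + 1 = (x + 1) + 2 := by ring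
  simp only [pvStepA, hlen, h2, pvGetD_shift _ _ _ _ hx, pvGetD_shift _ _ _ _ (by omega : (0:Int) ≤ x + 1),
    add_lt_add_iff_right]

theorem pvRange_two (L : Nat) :
    PySem.List.pyRange 0 ((L : Int) + 2) 2 = 0 :: (PySem.List.pyRange 0 (L : Int) 2).map (· + 2) := by
  rw [PySem.List.pyRange_of_pos _ _ (by norm_num), PySem.List.pyRange_of_pos _ _ (by norm_num)]
  rw [if_pos (by omega : (0:Int) < (L : Int) + 2)]
  have hcount : (((L : Int) + 2 - 0 + 2 - 1) / 2).toNat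
      = (if (0:Int) < (L : Int) then (((L : Int) - 0 + 2 - 1) / 2).toNat else 0) + 1 := by
    rcases Nat.eq_zero_or_pos L with h | h
    · subst h; norm_num
    · rw [if_pos (by exact_mod_cast h)]; omega
  rw [hcount, List.range_succ_eq_map]
  simp only [List.map_cons, List.map_map]
  refine List.cons_eq_cons.mpr ⟨by norm_num, ?_⟩
  apply List.map_congr_left
  intro k _
  simp only [Function.comp_apply]
  push_cast
  ring

theorem pvGetD_one (x y : Char) (xs : List Char) (d : Char) :
    PySem.List.pyGetD (x :: y :: xs) 1 d = y := by
  rw [PySem.List.pyGetD_of_nonneg _ _ (by norm_num)]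
  rfl

theorem pvA_eq_words : ∀ (n : Nat) (cs : List Char), cs.length = n → ∀ checksum : Int,
    (PySem.List.pyRange 0 (cs.length : Int) 2).foldl (pvStepA cs) checksum
      = (pvWordsAux none cs).foldl pvFoldAdd checksum := by
  intro n
  induction n using Nat.strong_induction_on with
  | _ n ih =>
    intro cs hlen checksum
    rcases cs with _ | ⟨a, _ | ⟨b, rest⟩⟩
    · simp [PySem.List.pyRange, pvWordsAux]
    · have h1 : (([a] : List Char).length : Int) = 1 := by simp
      have h2 : PySem.List.pyRange 0 1 2 = [0] := by decide
      rw [h1, h2]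
      simp only [List.foldl_cons, List.foldl_nil, pvWordsAux, pvStepA, pvFoldAdd,
        PySem.List.pyGetD_ofNat', h1]
      norm_num [List.getD]
    · have hlen2 : (((a :: b :: rest) : List Char).length : Int) = (rest.length : Int) + 2 := by
        push_cast [List.length_cons]; ring
      rw [hlen2, pvRange_two, List.foldl_cons, List.foldl_map]
      rw [PySem.List.foldl_congr_mem _ _ (pvStepA rest) _ ?_]
      · have hhead : pvStepA (a :: b :: rest) checksum 0
            = pvFoldAdd checksum (((a.toNat : Int) <<< (8 : Nat)) + (b.toNat : Int)) := by
          simp only [pvStepA, pvFoldAdd, PySem.List.pyGetD_ofNat', hlen2]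
          rw [if_pos (by omega : (0:Int) + 1 < (rest.length : Int) + 2)]
          norm_num [List.getD, pvGetD_one]
        rw [hhead]
        have hn : rest.length < n := by simp at hlen; omega
        have := ih rest.length hn rest rfl
          (pvFoldAdd checksum (((a.toNat : Int) <<< (8 : Nat)) + (b.toNat : Int)))
        simpa [pvWordsAux] using this
      · intro acc x hx
        have hx0 : 0 ≤ x := ((PySem.List.mem_pyRange_iff_of_pos (by norm_num) x).1 hx).1
        exact pvStepA_shift a b rest acc x hx0

theorem pvB_build : ∀ (cs : List Char) (acc : List Int) (pend : Option Int),
    pvFinishWords (cs.foldl pvPairStep (acc, pend)) = acc ++ pvWordsAux pend cs := by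
  intro cs
  induction cs with
  | nil => intro acc pend; cases pend <;> simp [pvFinishWords, pvWordsAux]
  | cons c rest ih =>
    intro acc pend
    cases pend with
    | none => simpa [pvPairStep, pvWordsAux] using ih acc (some ((c.toNat : Int)))
    | some p =>
      have := ih (acc ++ [(p <<< (8 : Nat)) + (c.toNat : Int)]) none
      simpa [pvPairStep, pvWordsAux, List.append_assoc] using this

-- ===== VERDICT (by name: the statement is the Claim_ definition above) =====
theorem compute_checksum_for_chuck_spec : Claim_equal_compute_checksum_for_chuck := by
  intro chunk checksum _
  unfold Spec_compute_checksum_for_chuck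
  unfold compute_checksum_for_chuck compute_checksum_for_chuck_alt
  dsimp only
  rw [pvA_eq_words chunk.toList.length chunk.toList rfl, pvB_build]
  simp
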